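-- pv_equiv track=rewrite | github.com/Baizak04/workone | python3/python3/pythonist/str.py | check_pali
-- ===== SOURCE A (Python) =====
-- from collections import defaultdict
--
-- def check_pali(our_string):
--     our_string = our_string.lower()
--     counts = defaultdict(int)
--     for letter in our_string:
--         if ord(letter) >= 97 and ord(letter) <= 122:
--             counts[letter] += 1
--     middle = ""
--     for letter in counts:
--         if middle and counts[letter] % 2 == 1:
--             return False
--         elif counts[letter] % 2 == 1:
--             middle = letter
--     return True
-- ===== SOURCE B (Python) =====
-- def check_pali(our_string):
--     letters = [c for c in our_string.lower() if 97 <= ord(c) <= 122]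
--     odd = 0
--     while letters:
--         c = letters[0]
--         rest = [x for x in letters if x != c]
--         odd += (len(letters) - len(rest)) % 2
--         letters = rest
--     return odd <= 1
-- ===== Notes on version B (the rewrite author's own statement) =====
-- stated objective: alternative
-- what changed: Replaces A's letter-count dict plus a second scan over its keys by a count-free repeated-partition loop: strip one whole letter class per iteration via list filtering and accumulate the parity of each class size.
import Mathlib
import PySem

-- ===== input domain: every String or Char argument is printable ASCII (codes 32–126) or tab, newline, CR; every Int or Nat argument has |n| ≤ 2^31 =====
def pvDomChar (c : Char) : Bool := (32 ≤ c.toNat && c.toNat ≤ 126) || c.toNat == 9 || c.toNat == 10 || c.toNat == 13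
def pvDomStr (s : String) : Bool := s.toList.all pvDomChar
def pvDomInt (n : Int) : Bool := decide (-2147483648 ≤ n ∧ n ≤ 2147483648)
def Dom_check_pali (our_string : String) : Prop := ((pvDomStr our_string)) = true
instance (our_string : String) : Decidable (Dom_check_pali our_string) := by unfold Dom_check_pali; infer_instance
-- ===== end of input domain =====

-- B replaces A's letter-count dict plus second key scan by a count-free repeated-partition loop
-- (strip one whole letter class per iteration, accumulating the parity of its size): alternative.

-- ===== PORT A =====
-- A's 'for letter in counts' loop; 'middle' is A's str accumulator, modelled as its character list ("" = [])
def checkPaliLoop (counts : PySem.Dict Char Int) : List Char → List Char → Bool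
  | [], _ => true
  | letter :: rest, middle =>
    if middle ≠ [] ∧ PySem.Int.mod (counts.getD letter 0) 2 = 1 then false
    else if PySem.Int.mod (counts.getD letter 0) 2 = 1 then checkPaliLoop counts rest [letter]
    else checkPaliLoop counts rest middle

def check_pali (our_string : String) : Bool :=
  let s := (PySem.Str.lower our_string).toList
  let counts : PySem.Dict Char Int :=
    s.foldl (fun d letter =>
      if 97 ≤ letter.toNat ∧ letter.toNat ≤ 122 then d.modify letter 0 (· + 1) else d)
      PySem.Dict.empty
  checkPaliLoop counts counts.keys []

-- ===== PORT B =====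
-- B's 'while letters' loop: strip the class of the first letter, add the parity of its size
def stripLoop (letters : List Char) (odd : Int) : Int :=
  match letters with
  | [] => odd
  | c :: t =>
    let rest := (c :: t).filter (fun x => x ≠ c)
    stripLoop rest (odd + PySem.Int.mod (((c :: t).length : Int) - (rest.length : Int)) 2)
termination_by letters.length
decreasing_by
  rw [List.length_filter_lt_length_iff_exists]
  exact ⟨c, List.mem_cons_self, by simp⟩

def check_pali_alt (our_string : String) : Bool :=
  let letters := (PySem.Str.lower our_string).toList.filter
    (fun c => decide (97 ≤ c.toNat ∧ c.toNat ≤ 122))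
  decide (stripLoop letters 0 ≤ 1)

-- ===== PRECONDITION & SPEC =====
def Spec_check_pali (our_string : String) (out : Bool) : Prop := out = check_pali_alt our_string
instance (our_string : String) (out : Bool) : Decidable (Spec_check_pali our_string out) := by unfold Spec_check_pali; infer_instance

-- ===== CLAIM (what is proved, stated in full; the proofs are below) =====
def Claim_equal_check_pali : Prop := ∀ (our_string : String), Dom_check_pali our_string → Spec_check_pali our_string (check_pali our_string)

-- ===== LEMMAS AND PROOFS =====

-- the a-z guard, shared by both ports' folds
def pvAZ (c : Char) : Bool := decide (97 ≤ c.toNat ∧ c.toNat ≤ 122)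

-- A's key loop counts the odd-count keys (plus one if 'middle' is already set) and compares with 1
lemma checkPaliLoop_eq (d : PySem.Dict Char Int) (ks : List Char) (middle : List Char) :
    checkPaliLoop d ks middle =
      decide (ks.countP (fun k => decide (PySem.Int.mod (d.getD k 0) 2 = 1))
              + (if middle = [] then 0 else 1) ≤ 1) := by
  induction ks generalizing middle with
  | nil => cases middle <;> simp [checkPaliLoop]
  | cons k rest ih =>
    by_cases hodd : PySem.Int.mod (d.getD k 0) 2 = 1 <;>
      by_cases hm : middle = [] <;>
      simp only [checkPaliLoop, hodd, hm, ih, List.countP_cons, ne_eq, not_true_eq_false,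
        false_and, if_false, not_false_eq_true, true_and, decide_true, decide_false] <;>
      simp

-- B's strip loop totals the parities of the class sizes: it counts the odd-count distinct letters
lemma stripLoop_eq (l : List Char) (odd : Int) :
    stripLoop l odd =
      odd + ((PySem.Set.ofList l).countP (fun k => decide (l.count k % 2 = 1)) : Int) := by
  induction hn : l.length using Nat.strong_induction_on generalizing l odd with
  | _ n ih =>
  match l with
  | [] => simp [stripLoop, PySem.Set.ofList]
  | c :: t =>
    rw [stripLoop]
    set rest := (c :: t).filter (fun x => x ≠ c) with hrest
    have hrlt : rest.length < (c :: t).length := by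
      rw [hrest, List.length_filter_lt_length_iff_exists]
      exact ⟨c, List.mem_cons_self, by simp⟩
    have hcount : (c :: t).length = rest.length + (c :: t).count c := by
      have := List.length_eq_countP_add_countP (l := c :: t) (p := fun x => x ≠ c)
      rw [hrest, List.countP_eq_length_filter] at *
      rw [this, List.count]
      congr 1
      apply List.countP_congr
      intro x _; by_cases h : x = c <;> simp [h]
    have hmod : PySem.Int.mod (((c :: t).length : Int) - (rest.length : Int)) 2
        = (((c :: t).count c % 2 : Nat) : Int) := by
      have : ((c :: t).length : Int) - (rest.length : Int) = (((c :: t).count c : Nat) : Int) := by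
        omega
      rw [this]
      exact_mod_cast PySem.Int.mod_natCast ((c :: t).count c) 2
    rw [ih rest.length (hn ▸ hrlt) rest _ rfl, hmod]
    -- relate the countP over distinct elements of l and of rest
    have hcm : ∀ x, x ∈ rest ↔ x ∈ (c :: t) ∧ x ≠ c := by
      intro x; rw [hrest]; simp; tauto
    have hcnotr : c ∉ PySem.Set.ofList rest := by
      rw [PySem.Set.mem_ofList]; intro h; exact ((hcm c).mp h).2 rfl
    have hperm : (PySem.Set.ofList (c :: t)).Perm (c :: PySem.Set.ofList rest) := by
      rw [List.perm_ext_iff_of_nodup (PySem.Set.nodup_ofList _)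
        (List.nodup_cons.mpr ⟨hcnotr, PySem.Set.nodup_ofList _⟩)]
      intro x
      simp only [PySem.Set.mem_ofList, List.mem_cons, hcm]
      by_cases hx : x = c <;> simp [hx]
    have hcp : (PySem.Set.ofList (c :: t)).countP (fun k => decide ((c :: t).count k % 2 = 1))
        = (if (c :: t).count c % 2 = 1 then 1 else 0)
          + (PySem.Set.ofList rest).countP (fun k => decide (rest.count k % 2 = 1)) := by
      rw [hperm.countP_eq, List.countP_cons]
      have : (PySem.Set.ofList rest).countP (fun k => decide ((c :: t).count k % 2 = 1))
          = (PySem.Set.ofList rest).countP (fun k => decide (rest.count k % 2 = 1)) := by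
        apply List.countP_congr
        intro x hx
        have hxc : x ≠ c := fun h => hcnotr (h ▸ hx)
        have : rest.count x = (c :: t).count x := by
          rw [hrest, List.count_filter]
          simp [hxc]
        rw [this]
      rw [this]
      by_cases h : (c :: t).count c % 2 = 1 <;> simp <;> omega
    rw [hcp]
    push_cast
    by_cases h : (c :: t).count c % 2 = 1 <;> simp <;> omega

-- ===== VERDICT (by name: the statement is the Claim_ definition above) =====
theorem check_pali_spec : Claim_equal_check_pali := by
  intro s _
  unfold Spec_check_pali check_pali check_pali_alt
  dsimp only
  set l := (PySem.Str.lower s).toList with hl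
  have hfunA : (fun (d : PySem.Dict Char Int) (letter : Char) =>
        if 97 ≤ letter.toNat ∧ letter.toNat ≤ 122 then d.modify letter 0 (· + 1) else d)
      = (fun d letter => if pvAZ letter = true then d.modify letter 0 (· + 1) else d) := by
    funext d c; simp [pvAZ]
  have hfB : (fun (c : Char) => decide (97 ≤ c.toNat ∧ c.toNat ≤ 122)) = pvAZ := by
    funext c; simp [pvAZ]
  rw [hfunA, hfB, ← List.foldl_filter, ← PySem.Dict.counter_eq_foldl]
  set lf := l.filter pvAZ with hlf
  rw [checkPaliLoop_eq, PySem.Dict.keys_counter, stripLoop_eq]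
  have hpred : (fun k => decide (PySem.Int.mod ((PySem.Dict.counter lf).getD k 0) 2 = 1))
      = (fun k => decide (lf.count k % 2 = 1)) := by
    funext k
    rw [PySem.Dict.getD_counter]
    have h2 : PySem.Int.mod ((lf.count k : Nat) : Int) 2 = ((lf.count k % 2 : Nat) : Int) := by
      exact_mod_cast PySem.Int.mod_natCast (lf.count k) 2
    rw [h2]
    simp
    omega
  rw [hpred]
  simp
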